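-- pv_equiv track=rewrite | github.com/Canner/wren-engine | ibis-server/tools/update_databricks_functions.py | _collect_after_header
-- ===== SOURCE A (Python) =====
-- from typing import Iterable, List, Optional, Tuple, Any
--
-- KNOWN_SECTION_NAMES = (
--     "function",
--     "class",
--     "usage",
--     "extended usage",
--     "arguments",
--     "examples",
--     "created by",
--     "since",
-- )
--
-- def _collect_after_header(lines: List[str], header: str) -> List[str]:
--     """Collect content lines after a section header (case-insensitive) until next section or blank divider.
--
--     - Header matching is based on the label before the first colon, e.g. "Usage" or "Function" (colon optional in input).
--     - Inline content on the same line after the colon is captured as the first element.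
--     - Collection stops when another known section label is encountered or a blank line is hit (after capturing at least one line).
--     """
--     out: List[str] = []
--     started = False
--     header_key = header.rstrip(":").strip().lower()
--     for raw in lines:
--         line = raw.rstrip()
--         striped = line.strip()
--
--         # Helper to detect if a line starts a section header and optionally return its label and remainder
--         def parse_header(s: str) -> Tuple[Optional[str], Optional[str]]:
--             if not s:
--                 return None, None
--             idx = s.find(":")
--             if idx == -1:
--                 return None, None
--             label = s[: idx].strip().lower()
--             remainder = s[idx + 1 :].strip()
--             return label, remainder
--
--         if not started:
--             lbl, remainder = parse_header(striped)
--             if lbl == header_key: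
--                 started = True
--                 if remainder:
--                     out.append(remainder)
--                 continue
--         else:
--             # If we reach another header, stop
--             lbl, _ = parse_header(striped)
--             if lbl and lbl in KNOWN_SECTION_NAMES:
--                 break
--
--             # Skip obvious separators
--             if not striped:
--                 if out:
--                     break
--                 else:
--                     continue
--
--             out.append(striped)
--     return out
-- ===== SOURCE B (Python) =====
-- from typing import List, Optional, Tuple
--
-- KNOWN_SECTION_NAMES = (
--     "function",
--     "class",
--     "usage",
--     "extended usage",
--     "arguments",
--     "examples",
--     "created by",
--     "since",
-- )
--
--
-- def _parse(s: str) -> Tuple[Optional[str], Optional[str]]: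
--     """Label before the first colon (lowercased) and stripped remainder, or (None, None)."""
--     if not s:
--         return None, None
--     idx = s.find(":")
--     if idx == -1:
--         return None, None
--     return s[:idx].strip().lower(), s[idx + 1:].strip()
--
--
-- def _collect_after_header(lines: List[str], header: str) -> List[str]:
--     header_key = header.rstrip(":").strip().lower()
--     # one parsing pass builds a label/remainder table for every line
--     parsed = [_parse(raw.strip()) for raw in lines]
--     start = next((i for i, (lbl, _) in enumerate(parsed) if lbl == header_key), None)
--     if start is None:
--         return []
--     # truncate the region at the next known section header
--     stop = next((k for k, (lbl, _) in enumerate(parsed[start + 1:])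
--                  if lbl and lbl in KNOWN_SECTION_NAMES), None)
--     body = [raw.strip() for raw in lines[start + 1:]]
--     if stop is not None:
--         body = body[:stop]
--     remainder = parsed[start][1]
--     if remainder:
--         out = [remainder]
--     else:
--         out = []
--         # no inline content: blank lines before the first content line are skipped
--         while body and not body[0]:
--             body = body[1:]
--     # the collected content is the maximal non-blank prefix of the region
--     cut = 0
--     while cut < len(body) and body[cut]:
--         cut += 1
--     return out + body[:cut]
-- ===== Notes on version B (the rewrite author's own statement) =====
-- stated objective: alternative
-- what changed: Replaced A's streaming state-machine loop (started flag, per-line decisions, parse closure redefined on every iteration) by a staged pipeline: build a parse table of (label, remainder) for all lines, locate the header index, truncate the following region at the next known section header, then trim the blank prefix (when there is no inline remainder) and cut at the first blank line.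
import Mathlib
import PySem

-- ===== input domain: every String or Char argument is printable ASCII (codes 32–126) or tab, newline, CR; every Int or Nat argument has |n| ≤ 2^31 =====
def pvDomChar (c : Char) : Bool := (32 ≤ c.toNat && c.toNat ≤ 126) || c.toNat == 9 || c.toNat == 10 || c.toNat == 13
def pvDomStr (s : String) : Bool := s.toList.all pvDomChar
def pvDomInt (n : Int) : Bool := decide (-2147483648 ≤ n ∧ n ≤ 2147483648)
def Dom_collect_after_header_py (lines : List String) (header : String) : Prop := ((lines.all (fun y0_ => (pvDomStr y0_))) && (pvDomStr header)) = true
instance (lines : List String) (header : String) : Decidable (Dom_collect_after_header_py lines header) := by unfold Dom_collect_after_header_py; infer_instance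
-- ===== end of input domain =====

-- B replaces A's streaming state-machine loop by a staged pipeline (parse table, find header index, truncate at next known section, trim blank prefix, cut at first blank); same return value, no side effects.

-- shared with both Pythons: KNOWN_SECTION_NAMES and the parse helper (identical text in Source A and Source B)
def pvKnown : List (List Char) :=
  ["function".toList, "class".toList, "usage".toList, "extended usage".toList,
   "arguments".toList, "examples".toList, "created by".toList, "since".toList]

-- _parse(s) / parse_header(s): (label, remainder) before/after the first colon, or none
def pvParseHeader (s : List Char) : Option (List Char × List Char) :=
  if s = [] then none
  else
    let idx := PySem.Chars.find s [':']
    if idx = -1 then none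
    else some (PySem.Chars.lower (PySem.Chars.strip (PySem.List.slice s none (some idx))),
               PySem.Chars.strip (PySem.List.slice s (some (idx + 1)) none))

-- 'lbl and lbl in KNOWN_SECTION_NAMES' on the optional label
def pvIsKnown (lbl? : Option (List Char)) : Bool :=
  match lbl? with
  | none => false
  | some l => decide (l ≠ []) && pvKnown.contains l

-- header.rstrip(":").strip().lower() — rstrip(":") ported by hand (drop trailing ':' chars), exact
def pvHeaderKey (header : String) : List Char :=
  PySem.Chars.lower (PySem.Chars.strip ((header.toList.reverse.dropWhile (· == ':')).reverse))

-- ===== PORT A =====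
-- the for-loop of A, state = (out, started)
def pvGoA (hk : List Char) (ls : List String) (out : List String) (started : Bool) : List String :=
  match ls with
  | [] => out
  | raw :: rest =>
    let line := PySem.Chars.rstrip raw.toList
    let striped := PySem.Chars.strip line
    if started = false then
      match pvParseHeader striped with
      | some (lbl, remainder) =>
        if lbl = hk then
          pvGoA hk rest (if remainder ≠ [] then out ++ [String.ofList remainder] else out) true
        else pvGoA hk rest out started
      | none => pvGoA hk rest out started   -- lbl is None, never equal to header_key (a str)
    else
      if pvIsKnown ((pvParseHeader striped).map Prod.fst) then out         -- break
      else if striped = [] then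
        (if out ≠ [] then out else pvGoA hk rest out started)              -- break / continue
      else pvGoA hk rest (out ++ [String.ofList striped]) started

def collect_after_header_py (lines : List String) (header : String) : List String :=
  pvGoA (pvHeaderKey header) lines [] false

-- ===== PORT B =====
-- 'while body and not body[0]: body = body[1:]' of Source B
def pvDropBlank : List String → List String
  | [] => []
  | s :: rest => if s.toList = [] then pvDropBlank rest else s :: rest

-- the 'cut' while-loop + 'body[:cut]' of Source B: maximal non-blank prefix
def pvTakeContent : List String → List String
  | [] => []
  | s :: rest => if s.toList ≠ [] then s :: pvTakeContent rest else []

-- the post-start part of Source B: truncate at next known section, then trim/cut at blanks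
def pvRegion (parsedTail : List (Option (List Char × List Char))) (linesTail : List String)
    (rem : List Char) : List String :=
  let stop? := parsedTail.findIdx? (fun p => pvIsKnown (p.map Prod.fst))
  let body0 := linesTail.map (fun raw => String.ofList (PySem.Chars.strip raw.toList))
  let body1 := match stop? with | none => body0 | some k => body0.take k
  if rem ≠ [] then String.ofList rem :: pvTakeContent body1
  else pvTakeContent (pvDropBlank body1)

def collect_after_header_py_alt (lines : List String) (header : String) : List String :=
  let hk := pvHeaderKey header
  let parsed := lines.map (fun raw => pvParseHeader (PySem.Chars.strip raw.toList))
  match parsed.findIdx? (fun p => p.map Prod.fst == some hk) with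
  | none => []
  | some start =>
    pvRegion (parsed.drop (start + 1)) (lines.drop (start + 1))
      (match parsed.getD start none with | some (_, r) => r | none => [])

-- ===== PRECONDITION & SPEC =====
def Spec_collect_after_header_py (lines : List String) (header : String) (out : List String) : Prop := out = collect_after_header_py_alt lines header
instance (lines : List String) (header : String) (out : List String) : Decidable (Spec_collect_after_header_py lines header out) := by unfold Spec_collect_after_header_py; infer_instance

-- ===== CLAIM (what is proved, stated in full; the proofs are below) =====
def Claim_equal_collect_after_header_py : Prop := ∀ (lines : List String) (header : String), Dom_collect_after_header_py lines header → Spec_collect_after_header_py lines header (collect_after_header_py lines header)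

-- ===== LEMMAS AND PROOFS =====

-- proof-layer notions
def pvStripL (raw : String) : List Char := PySem.Chars.strip raw.toList
def pvStrS (raw : String) : String := String.ofList (pvStripL raw)
def pvParseR (raw : String) : Option (List Char × List Char) := pvParseHeader (pvStripL raw)
def pvKnownB (raw : String) : Bool := pvIsKnown ((pvParseR raw).map Prod.fst)
def pvBlankB (raw : String) : Bool := decide (pvStripL raw = [])
def pvContentB (raw : String) : Bool := !pvKnownB raw && decide (pvStripL raw ≠ [])
def pvTakeC (ls : List String) : List String := (ls.takeWhile pvContentB).map pvStrS

-- intermediate form of A's loop: phase1 finds the header, phase2 collects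
def pvPhase2 (ls : List String) (out : List String) : List String :=
  match ls with
  | [] => out
  | raw :: rest =>
    let striped := PySem.Chars.strip raw.toList
    if pvIsKnown ((pvParseHeader striped).map Prod.fst) then out
    else if striped = [] then
      (if out ≠ [] then out else pvPhase2 rest out)
    else pvPhase2 rest (out ++ [String.ofList striped])

def pvPhase1 (hk : List Char) (ls : List String) : List String :=
  match ls with
  | [] => []
  | raw :: rest =>
    match pvParseHeader (PySem.Chars.strip raw.toList) with
    | some (lbl, remainder) =>
      if lbl = hk then pvPhase2 rest (if remainder ≠ [] then [String.ofList remainder] else [])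
      else pvPhase1 hk rest
    | none => pvPhase1 hk rest

-- dropping leading whitespace commutes with dropping trailing whitespace
theorem pv_dropWhile_rdropWhile_comm {α : Type} (p : α → Bool) (l : List α) :
    (l.rdropWhile p).dropWhile p = (l.dropWhile p).rdropWhile p := by
  induction l with
  | nil => simp
  | cons h t ih =>
    by_cases hnil : t.rdropWhile p = []
    · have hall : ∀ x ∈ t, p x = true := (List.rdropWhile_eq_nil_iff).mp hnil
      have ht : t.dropWhile p = [] := List.dropWhile_eq_nil_iff.mpr hall
      have hrev : t.reverse.dropWhile p = [] := by
        simpa [List.rdropWhile] using congrArg List.reverse hnil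
      by_cases hp : p h = true
      · simp [List.rdropWhile, List.dropWhile_append, hrev, hp, ht]
      · simp [List.rdropWhile, List.dropWhile_append, hrev, hp]
    · have hrev : t.reverse.dropWhile p ≠ [] := by
        intro h'; exact hnil (by simp [List.rdropWhile, h'])
      have hcons : (h :: t).rdropWhile p = h :: t.rdropWhile p := by
        simp [List.rdropWhile, List.dropWhile_append, List.isEmpty_iff, hrev]
      by_cases hp : p h = true
      · rw [hcons]
        simp [hp, ih]
      · rw [hcons]
        simp [hp, hcons]

-- A computes raw.rstrip().strip(); the others compute raw.strip(); the values agree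
theorem pv_strip_rstrip (l : List Char) :
    PySem.Chars.strip (PySem.Chars.rstrip l) = PySem.Chars.strip l := by
  have hr : ∀ x : List Char, PySem.Chars.rstrip x = x.rdropWhile PySem.Chars.isspace := by
    intro x; simp [PySem.Chars.rstrip, List.rdropWhile]
  have hl : ∀ x : List Char, PySem.Chars.lstrip x = x.dropWhile PySem.Chars.isspace := by
    intro x; simp [PySem.Chars.lstrip]
  simp only [PySem.Chars.strip, hr, hl]
  rw [pv_dropWhile_rdropWhile_comm, List.rdropWhile_idempotent]

-- A's loop with started = true is exactly the phase-2 collector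
theorem pv_goA_true_eq_phase2 (hk : List Char) (ls : List String) :
    ∀ out, pvGoA hk ls out true = pvPhase2 ls out := by
  induction ls with
  | nil => intro out; rfl
  | cons raw rest ih =>
    intro out
    simp only [pvGoA, pvPhase2, pv_strip_rstrip]
    rw [if_neg (by simp)]
    split_ifs <;> simp [ih]

-- A's loop with started = false and empty out is exactly the phase-1 scanner
theorem pv_goA_false_eq_phase1 (hk : List Char) (ls : List String) :
    pvGoA hk ls [] false = pvPhase1 hk ls := by
  induction ls with
  | nil => rfl
  | cons raw rest ih =>
    simp only [pvGoA, pvPhase1, pv_strip_rstrip]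
    cases hp : pvParseHeader (PySem.Chars.strip raw.toList) with
    | none => simpa using ih
    | some p =>
      obtain ⟨lbl, remainder⟩ := p
      by_cases hl : lbl = hk
      · simp only [hl, if_true]
        rw [pv_goA_true_eq_phase2]
        split_ifs <;> simp
      · simpa [hl] using ih

-- a known-section line is never blank (parse of the empty string is none)
theorem pv_blank_not_known (raw : String) (h : pvBlankB raw = true) : pvKnownB raw = false := by
  have : pvStripL raw = [] := by simpa [pvBlankB] using h
  simp [pvKnownB, pvParseR, this, pvParseHeader, pvIsKnown]

-- pvTakeContent over a mapped-strip list is a takeWhile on the raw lines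
theorem pv_takeContent_map (ls : List String) :
    pvTakeContent (ls.map pvStrS) = (ls.takeWhile (fun r => decide (pvStripL r ≠ []))).map pvStrS := by
  induction ls with
  | nil => rfl
  | cons raw rest ih =>
    simp only [List.map, pvTakeContent, pvStrS, List.takeWhile]
    by_cases h : pvStripL raw = [] <;> simp [h, ih, pvStrS]

-- pvDropBlank over a mapped-strip list is a dropWhile on the raw lines
theorem pv_dropBlank_map (ls : List String) :
    pvDropBlank (ls.map pvStrS) = (ls.dropWhile pvBlankB).map pvStrS := by
  induction ls with
  | nil => rfl
  | cons raw rest ih =>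
    simp only [List.map, pvDropBlank, pvStrS, List.dropWhile]
    by_cases h : pvStripL raw = [] <;> simp [h, ih, pvBlankB, pvStrS]

-- truncation at the first known-section index is a takeWhile on the raw lines
theorem pv_trunc_eq_takeWhile (ls : List String) :
    (match (ls.map pvParseR).findIdx? (fun p => pvIsKnown (p.map Prod.fst)) with
      | none => ls.map pvStrS
      | some k => (ls.map pvStrS).take k) =
    (ls.takeWhile (fun r => !pvKnownB r)).map pvStrS := by
  induction ls with
  | nil => rfl
  | cons raw rest ih =>
    simp only [List.map, List.findIdx?_cons, List.takeWhile, pvKnownB]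
    by_cases h : pvIsKnown ((pvParseR raw).map Prod.fst) = true
    · simp [pvParseR] at h ⊢
      simp [h]
    · rw [Bool.not_eq_true] at h
      have h' : pvIsKnown ((pvParseHeader (pvStripL raw)).map Prod.fst) = false := h
      cases hf : (rest.map pvParseR).findIdx? (fun p => pvIsKnown (p.map Prod.fst)) with
      | none =>
        rw [hf] at ih
        simp [hf, h, ih, pvKnownB]
      | some k =>
        rw [hf] at ih
        simp [hf, h, List.take_succ_cons, ih, pvKnownB]

-- two takeWhile in a row combine
theorem pv_takeWhile_takeWhile {α : Type} (p q : α → Bool) (l : List α) :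
    (l.takeWhile p).takeWhile q = l.takeWhile (fun a => p a && q a) := by
  induction l with
  | nil => rfl
  | cons h t ih =>
    by_cases hp : p h = true <;> by_cases hq : q h = true <;>
      simp [List.takeWhile, hp, hq, ih]

-- trimming the blank prefix commutes with truncating at the first known header
theorem pv_swap (ls : List String) :
    ((ls.takeWhile (fun r => !pvKnownB r)).dropWhile pvBlankB).takeWhile
        (fun r => decide (pvStripL r ≠ [])) =
    (ls.dropWhile pvBlankB).takeWhile pvContentB := by
  induction ls with
  | nil => rfl
  | cons raw rest ih =>
    simp only [ne_eq, decide_not] at ih ⊢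
    by_cases hb : pvBlankB raw = true
    · have hk := pv_blank_not_known raw hb
      simp [List.takeWhile, List.dropWhile, hk, hb, ih]
    · by_cases hk : pvKnownB raw = true
      · simp [List.takeWhile, List.dropWhile, hk, hb, pvContentB]
      · have hnb : (pvStripL raw ≠ []) := by
          intro h; exact hb (by simpa [pvBlankB] using h)
        have hc : pvContentB raw = true := by simp [pvContentB, hk, hnb]
        simp [List.takeWhile, List.dropWhile, hk, hb, hnb, hc, pv_takeWhile_takeWhile]
        congr 1
        funext a; simp [pvContentB]
  
-- phase 2 with a non-empty accumulator collects the maximal content prefix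
theorem pv_phase2_ne (ls : List String) :
    ∀ out, out ≠ [] → pvPhase2 ls out = out ++ pvTakeC ls := by
  induction ls with
  | nil => intro out _; simp [pvPhase2, pvTakeC]
  | cons raw rest ih =>
    intro out hout
    simp only [pvPhase2]
    by_cases hk : pvIsKnown ((pvParseHeader (PySem.Chars.strip raw.toList)).map Prod.fst) = true
    · simp [hk, pvTakeC, List.takeWhile, pvContentB, pvKnownB, pvParseR, pvStripL]
    · by_cases hb : PySem.Chars.strip raw.toList = []
      · simp [hk, hb, hout, pvTakeC, List.takeWhile, pvContentB, pvStripL]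
      · have := ih (out ++ [String.ofList (PySem.Chars.strip raw.toList)]) (by simp)
        simp [hk, hb, this, pvTakeC, List.takeWhile, pvContentB, pvKnownB, pvParseR,
          pvStripL, pvStrS]

-- phase 2 with an empty accumulator first skips blank lines
theorem pv_phase2_nil (ls : List String) :
    pvPhase2 ls [] = pvTakeC (ls.dropWhile pvBlankB) := by
  induction ls with
  | nil => simp [pvPhase2, pvTakeC]
  | cons raw rest ih =>
    simp only [pvPhase2]
    by_cases hb : PySem.Chars.strip raw.toList = []
    · have hb' : pvBlankB raw = true := by simpa [pvBlankB, pvStripL] using hb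
      have hk : pvIsKnown ((pvParseHeader (PySem.Chars.strip raw.toList)).map Prod.fst) = false := by
        have := pv_blank_not_known raw hb'
        simpa [pvKnownB, pvParseR, pvStripL] using this
      simp [hk, hb, ih, List.dropWhile, hb', pvParseHeader, pvIsKnown]
    · have hb' : pvBlankB raw = false := by simpa [pvBlankB, pvStripL] using hb
      by_cases hk : pvIsKnown ((pvParseHeader (PySem.Chars.strip raw.toList)).map Prod.fst) = true
      · simp [hk, List.dropWhile, hb', pvTakeC, List.takeWhile, pvContentB, pvKnownB,
          pvParseR, pvStripL]
      · have := pv_phase2_ne rest [String.ofList (PySem.Chars.strip raw.toList)] (by simp)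
        simp [hk, hb, this, List.dropWhile, hb', pvTakeC, List.takeWhile, pvContentB,
          pvKnownB, pvParseR, pvStripL, pvStrS]

-- the region pipeline of B computes exactly phase 2
theorem pv_region_eq_phase2 (ls : List String) (rem : List Char) :
    pvRegion (ls.map pvParseR) ls rem =
      pvPhase2 ls (if rem ≠ [] then [String.ofList rem] else []) := by
  have hmap : ls.map (fun raw => String.ofList (PySem.Chars.strip raw.toList)) = ls.map pvStrS := by
    simp [pvStrS, pvStripL]
  have hbody :
      (match (ls.map pvParseR).findIdx? (fun p => pvIsKnown (p.map Prod.fst)) with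
        | none => ls.map pvStrS
        | some k => (ls.map pvStrS).take k) =
      (ls.takeWhile (fun r => !pvKnownB r)).map pvStrS := pv_trunc_eq_takeWhile ls
  by_cases hrem : rem = []
  · subst hrem
    simp only [pvRegion, hmap, hbody, ne_eq, not_true_eq_false, if_false, reduceIte]
    rw [pv_dropBlank_map, pv_takeContent_map, pv_swap, pv_phase2_nil, pvTakeC]
  · have h2 := pv_phase2_ne ls [String.ofList rem] (by simp)
    simp only [pvRegion, hmap, hbody, ne_eq, hrem, not_false_eq_true, if_true, reduceIte]
    rw [pv_takeContent_map, pv_takeWhile_takeWhile]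
    have : (fun r => !pvKnownB r && decide (pvStripL r ≠ [])) = pvContentB := by
      funext r; simp [pvContentB]
    rw [this, h2, pvTakeC]
    simp

-- B's header scan computes exactly phase 1
theorem pv_alt_eq_phase1 (hk : List Char) (ls : List String) :
    (match (ls.map pvParseR).findIdx? (fun p => p.map Prod.fst == some hk) with
      | none => []
      | some start =>
        pvRegion ((ls.map pvParseR).drop (start + 1)) (ls.drop (start + 1))
          (match (ls.map pvParseR).getD start none with | some (_, r) => r | none => [])) =
    pvPhase1 hk ls := by
  induction ls with
  | nil => rfl
  | cons raw rest ih =>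
    simp only [List.map, List.findIdx?_cons, pvPhase1]
    by_cases hm : ((pvParseR raw).map Prod.fst == some hk) = true
    · cases hp : pvParseR raw with
      | none => rw [hp] at hm; simp at hm
      | some p =>
        obtain ⟨lbl, rem⟩ := p
        rw [hp] at hm
        have hlbl : lbl = hk := by simpa using hm
        simp only [hp, hm, if_true, List.drop_succ_cons, List.drop_zero, List.getD_cons_zero]
        rw [pv_region_eq_phase2]
        simp [pvParseR, pvStripL] at hp
        simp [hp, hlbl]
    · simp only [hm, if_false, Bool.false_eq_true]
      cases hf : (rest.map pvParseR).findIdx? (fun p => p.map Prod.fst == some hk) with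
      | none =>
        rw [hf] at ih
        cases hp : pvParseR raw with
        | none =>
          simp only [hf, Option.map_none]
          simp [pvParseR, pvStripL] at hp
          simp [hp, ← ih]
        | some p =>
          obtain ⟨lbl, rem⟩ := p
          have hlbl : lbl ≠ hk := by
            intro h; rw [hp, h] at hm; simp at hm
          simp only [hf, Option.map_none]
          simp [pvParseR, pvStripL] at hp
          simp [hp, hlbl, ← ih]
      | some k =>
        rw [hf] at ih
        cases hp : pvParseR raw with
        | none =>
          simp only [hf, Option.map_some]
          simp [pvParseR, pvStripL] at hp
          simp [hp, ← ih]
        | some p =>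
          obtain ⟨lbl, rem⟩ := p
          have hlbl : lbl ≠ hk := by
            intro h; rw [hp, h] at hm; simp at hm
          simp only [hf, Option.map_some]
          simp [pvParseR, pvStripL] at hp
          simp [hp, hlbl, ← ih]

-- ===== VERDICT (by name: the statement is the Claim_ definition above) =====
theorem collect_after_header_py_spec : Claim_equal_collect_after_header_py := by
  intro lines header _
  unfold Spec_collect_after_header_py collect_after_header_py collect_after_header_py_alt
  rw [pv_goA_false_eq_phase1]
  have h := pv_alt_eq_phase1 (pvHeaderKey header) lines
  have hmap : lines.map (fun raw => pvParseHeader (PySem.Chars.strip raw.toList)) =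
      lines.map pvParseR := by simp [pvParseR, pvStripL]
  rw [← h, hmap]
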